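-- pv_equiv track=rewrite | github.com/lwiklendt/lsw | lsw/collect.py | permutation_swaps
-- ===== SOURCE A (Python) =====
-- def permutation_swaps(n):
--     """
--     Heap's algorithm for generating permutation swaps.
--     :param n: number of elements to permute
--     :return: generator yielding a pair of indexes for which pair of elements should be swapped
--     """
--     c = [0] * n
--     i = 0
--     while i < n:
--         if c[i] < i:
--             if i % 2 == 0:
--                 yield (0, i)
--             else:
--                 yield (c[i], i)
--             c[i] += 1
--             i = 0
--         else:
--             c[i] = 0
--             i += 1
-- ===== SOURCE B (Python) =====
-- def permutation_swaps(n):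
--     """
--     Heap's algorithm in its classic recursive form: generate(k) emits the
--     swap sequence for the first k elements; identical output to the
--     iterative version.
--     """
--     def generate(k):
--         if k <= 1:
--             return
--         for i in range(k - 1):
--             yield from generate(k - 1)
--             if k % 2 == 0:
--                 yield (i, k - 1)
--             else:
--                 yield (0, k - 1)
--         yield from generate(k - 1)
--     return generate(n)
-- ===== Notes on version B (the rewrite author's own statement) =====
-- stated objective: alternative
-- what changed: Replaced the iterative counter-array formulation of Heap's algorithm (while loop over a control array c with resets of the scan index) by the classic recursive formulation: a recursive generator generate(k) that interleaves generate(k-1) with the parity-dependent swap pair for position k-1.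
import Mathlib
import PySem

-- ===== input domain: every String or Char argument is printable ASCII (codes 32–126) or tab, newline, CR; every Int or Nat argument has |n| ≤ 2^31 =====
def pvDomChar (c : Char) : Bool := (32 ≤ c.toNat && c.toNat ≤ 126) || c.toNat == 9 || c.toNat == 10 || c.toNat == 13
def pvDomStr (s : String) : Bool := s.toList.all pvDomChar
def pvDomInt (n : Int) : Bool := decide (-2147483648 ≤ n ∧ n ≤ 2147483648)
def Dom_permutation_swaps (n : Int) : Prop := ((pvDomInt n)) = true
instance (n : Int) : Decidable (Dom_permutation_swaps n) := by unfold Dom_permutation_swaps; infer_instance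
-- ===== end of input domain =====

-- B replaces the iterative counter-array form of Heap's algorithm by the classic
-- recursive form (alternative decomposition, same output and cost). Both Pythons
-- return a generator; the equivalence is about the sequence of pairs it yields.

-- ===== PORT A =====
-- exact number of loop iterations A's while loop performs before reaching scan
-- position k from an all-zero prefix (proved sufficient in heapLoopA_run below);
-- the fuel is only a totality guard, the loop body is A's code step for step
def sFuel : Nat → Nat
  | 0 => 0
  | k + 1 => sFuel k + k * (1 + sFuel k) + 1

-- Python's `while i < n` loop; the counters in c are naturals (only ever 0 or
-- incremented), and len(c) = n throughout, so `i < c.length` is Python's `i < n`.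
def heapLoopA : Nat → List Nat → Nat → List (Int × Int) → List (Int × Int)
  | 0, _, _, acc => acc
  | fuel + 1, c, i, acc =>
    if i < c.length then
      let ci := c.getD i 0
      if ci < i then
        let p : Int × Int := if i % 2 = 0 then (0, (i : Int)) else ((ci : Int), (i : Int))
        heapLoopA fuel (c.set i (ci + 1)) 0 (acc ++ [p])
      else
        heapLoopA fuel (c.set i 0) (i + 1) acc
    else acc

def permutation_swaps (n : Int) : List (Int × Int) :=
  heapLoopA (sFuel n.toNat + 1) (List.replicate n.toNat 0) 0 []

-- ===== PORT B =====
-- recursive generate(k): interleave generate(k-1) with the swap pair for slot k-1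
def genAlt : Nat → List (Int × Int)
  | 0 => []
  | 1 => []
  | k + 2 =>
    (List.range (k + 1)).foldl
      (fun acc (i : Nat) =>
        acc ++ genAlt (k + 1) ++
          [if (k + 2) % 2 = 0 then ((i : Int), ((k + 2 : Nat) : Int) - 1)
           else (0, ((k + 2 : Nat) : Int) - 1)]) []
    ++ genAlt (k + 1)

def permutation_swaps_alt (n : Int) : List (Int × Int) := genAlt n.toNat

-- ===== PRECONDITION & SPEC =====
def Spec_permutation_swaps (n : Int) (out : List (Int × Int)) : Prop := out = permutation_swaps_alt n
instance (n : Int) (out : List (Int × Int)) : Decidable (Spec_permutation_swaps n out) := by unfold Spec_permutation_swaps; infer_instance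

-- ===== CLAIM (what is proved, stated in full; the proofs are below) =====
def Claim_equal_permutation_swaps : Prop := ∀ (n : Int), Dom_permutation_swaps n → Spec_permutation_swaps n (permutation_swaps n)

-- ===== LEMMAS AND PROOFS =====

-- the swap pair A emits at scan position k when c[k] = v
def pairAt (k v : Nat) : Int × Int :=
  if k % 2 = 0 then (0, (k : Int)) else ((v : Int), (k : Int))

theorem swap_concat {α β : Type} (l : List α) (b : List β) (f : α → β) :
    (l.flatMap fun i => b ++ [f i]) ++ b = b ++ l.flatMap fun i => f i :: b := by
  induction l with
  | nil => simp
  | cons x xs ih =>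
    simp only [List.flatMap_cons] at *
    simp [← ih, List.append_assoc]

-- genAlt (k+1) in "flatMap" form
theorem genAlt_succ (k : Nat) :
    genAlt (k + 1) = genAlt k ++ (List.range k).flatMap fun v => pairAt k v :: genAlt k := by
  rcases k with _ | m
  · simp [genAlt]
  · show genAlt (m + 2) = _
    rw [genAlt]
    have hpair : ∀ i : Nat,
        (if (m + 2) % 2 = 0 then ((i : Int), ((m + 2 : Nat) : Int) - 1)
          else (0, ((m + 2 : Nat) : Int) - 1)) = pairAt (m + 1) i := by
      intro i
      unfold pairAt
      by_cases hp : (m + 1) % 2 = 0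
      · rw [if_neg (by omega), if_pos hp]
        push_cast
        norm_num
        ring
      · rw [if_pos (by omega), if_neg hp]
        push_cast
        norm_num
        ring
    have hfun : (fun (acc : List (Int × Int)) (i : Nat) => acc ++ genAlt (m + 1) ++
        [if (m + 2) % 2 = 0 then ((i : Int), ((m + 2 : Nat) : Int) - 1)
          else (0, ((m + 2 : Nat) : Int) - 1)])
        = fun (acc : List (Int × Int)) (i : Nat) => acc ++ (genAlt (m + 1) ++ [pairAt (m + 1) i]) := by
      funext acc i
      rw [hpair i, List.append_assoc]
    rw [hfun, PySem.List.foldl_append_eq_flatMap, List.nil_append, swap_concat]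

theorem getD_set_self' (c : List Nat) (k v : Nat) (h : k < c.length) :
    (c.set k v).getD k 0 = v := by
  simp [List.getD, h]

theorem getD_set_ne' (c : List Nat) (k v j : Nat) (h : j ≠ k) :
    (c.set k v).getD j 0 = c.getD j 0 := by
  simp [List.getD, List.getElem?_set_ne (Ne.symm h)]

theorem set_self' (c : List Nat) (k : Nat) (_h : k < c.length) (hv : c.getD k 0 = 0) :
    c.set k 0 = c := by
  apply List.ext_getElem (by simp)
  intro j hj1 hj2
  rw [List.getElem_set]
  split_ifs with hkj
  · subst hkj
    have h2 := hv
    simp [List.getD, List.getElem?_eq_getElem hj2] at h2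
    omega
  · rfl

-- the main invariant: from a state whose first k counters are zero, A's loop
-- emits exactly genAlt k in sFuel k iterations and arrives at scan position k
-- with the state unchanged and the remaining fuel intact
theorem heapLoopA_run (k : Nat) : ∀ (c : List Nat) (acc : List (Int × Int)) (fuel : Nat),
    k ≤ c.length → (∀ j, j < k → c.getD j 0 = 0) →
    heapLoopA (sFuel k + fuel) c 0 acc = heapLoopA fuel c k (acc ++ genAlt k) := by
  induction k with
  | zero => intro c acc fuel _ _; simp [sFuel, genAlt]
  | succ k ih =>
    intro c acc fuel hk hz
    -- inner induction: run the digit at position k from value v up to k,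
    -- consuming exactly (k - v) * (1 + sFuel k) + 1 iterations
    have inner : ∀ (m v : Nat), k - v = m → v ≤ k →
        ∀ (c : List Nat) (acc : List (Int × Int)) (fuel : Nat), k < c.length →
        (∀ j, j < k → c.getD j 0 = 0) → c.getD k 0 = v →
        heapLoopA ((m * (1 + sFuel k) + 1) + fuel) c k acc = heapLoopA fuel (c.set k 0) (k + 1)
          (acc ++ (List.range' v (k - v)).flatMap fun u => pairAt k u :: genAlt k) := by
      intro m
      induction m with
      | zero =>
        intro v hm hv c acc fuel hlen hz0 hck
        have hvk : v = k := by omega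
        rw [show (0 * (1 + sFuel k) + 1) + fuel = fuel + 1 from by ring]
        rw [heapLoopA, if_pos hlen, if_neg (by omega)]
        rw [hm]
        simp [hvk]
      | succ m ihm =>
        intro v hm hv c acc fuel hlen hz0 hck
        have hvk : v < k := by omega
        have hfuel : ((m + 1) * (1 + sFuel k) + 1) + fuel
            = (sFuel k + ((m * (1 + sFuel k) + 1) + fuel)) + 1 := by ring
        rw [hfuel, heapLoopA, if_pos hlen]
        rw [if_pos (by rw [hck]; omega)]
        have hp : (if k % 2 = 0 then ((0 : Int), (k : Int))
            else ((c.getD k 0 : Int), (k : Int))) = pairAt k v := by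
          rw [hck]; unfold pairAt; rfl
        rw [hp, hck]
        -- run the digits below k again (outer IH), then continue at k (inner IH)
        rw [ih (c.set k (v + 1)) (acc ++ [pairAt k v]) _ (by simp; omega)
          (fun j hj => by rw [getD_set_ne' _ _ _ _ (by omega)]; exact hz0 j hj)]
        rw [ihm (v + 1) (by omega) (by omega) (c.set k (v + 1))
          (acc ++ [pairAt k v] ++ genAlt k) fuel (by simp; omega)
          (fun j hj => by rw [getD_set_ne' _ _ _ _ (by omega)]; exact hz0 j hj)
          (getD_set_self' _ _ _ hlen)]
        rw [List.set_set]
        have hrange : List.range' v (k - v) = v :: List.range' (v + 1) (k - (v + 1)) := by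
          have : k - v = (k - (v + 1)) + 1 := by omega
          rw [this, List.range'_succ]
        rw [hrange, List.flatMap_cons]
        simp [List.append_assoc]
    have hsplit : sFuel (k + 1) + fuel = sFuel k + ((k * (1 + sFuel k) + 1) + fuel) := by
      show sFuel k + k * (1 + sFuel k) + 1 + fuel = _
      ring
    rw [hsplit, ih c acc _ (by omega) (fun j hj => hz j (by omega))]
    have step := inner (k - 0) 0 rfl (Nat.zero_le k) c (acc ++ genAlt k) fuel
      (by omega) (fun j hj => hz j (by omega)) (hz k (by omega))
    rw [Nat.sub_zero] at step
    rw [step, set_self' c k (by omega) (hz k (by omega))]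
    rw [← List.range_eq_range', List.append_assoc, ← genAlt_succ]

-- ===== VERDICT (by name: the statement is the Claim_ definition above) =====
theorem permutation_swaps_spec : Claim_equal_permutation_swaps := by
  intro n _
  unfold Spec_permutation_swaps permutation_swaps permutation_swaps_alt
  set N := n.toNat with hN
  have hlen : (List.replicate N (0 : Nat)).length = N := by simp
  rw [heapLoopA_run N (List.replicate N 0) [] 1 (by omega)
    (fun j hj => by simp [List.getD])]
  rw [heapLoopA, if_neg (by omega)]
  simp
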